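-- pv_equiv track=rewrite | github.com/bosl95/Algorithm | out/production/Algorithm/test/11/03.py | solution
-- ===== SOURCE A (Python) =====
-- def solution(A):
--     cnt = 0
--     n = len(A)
--     A.sort()
--     for i in range(n, 0, -1):
--         if A[-1]!=i: cnt += (i-A[-1])
--         A.pop()
--         for j in range(len(A)-1, -1, -1):
--             if A[j] == i:
--                 A[j] -= 1; cnt += 1
--             else:
--                 break
--     return cnt
-- ===== SOURCE B (Python) =====
-- def solution(A):
--     b = sorted(A)
--     n = len(b)
--     cnt = 0
--     t = n                       # positions [t, i-1] form the cascade run, all currently equal to i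
--     for i in range(n, 0, -1):
--         if t == i:              # run empty: the popped element is the untouched b[i-1]
--             cnt += i - b[i - 1]
--             u = i - 1
--         else:                   # run nonempty: popped element equals i, contributes 0
--             u = t
--         while u > 0 and b[u - 1] == i:   # extend the run downward over entries equal to i
--             u -= 1
--         cnt += (i - 1) - u      # one unit per element decremented in this step
--         t = u
--     return cnt
-- ===== Notes on version B (the rewrite author's own statement) =====
-- stated objective: faster
-- what changed: B never mutates the list: instead of popping and re-decrementing a suffix of equal elements every iteration, it tracks the cascade run by a single integer boundary t, so each element is touched O(1) times after the sort (A also empties its argument in place; B leaves it untouched).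
import Mathlib
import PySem

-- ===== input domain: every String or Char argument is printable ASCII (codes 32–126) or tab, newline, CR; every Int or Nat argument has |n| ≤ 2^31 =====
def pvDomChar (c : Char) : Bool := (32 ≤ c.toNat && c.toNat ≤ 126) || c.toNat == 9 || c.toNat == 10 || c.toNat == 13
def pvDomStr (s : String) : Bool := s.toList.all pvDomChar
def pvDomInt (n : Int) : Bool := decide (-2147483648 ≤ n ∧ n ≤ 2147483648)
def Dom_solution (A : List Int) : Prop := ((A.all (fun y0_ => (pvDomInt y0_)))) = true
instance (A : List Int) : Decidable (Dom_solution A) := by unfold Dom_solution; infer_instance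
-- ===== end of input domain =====

-- B replaces A's in-place pop/re-decrement simulation by an integer boundary tracking the cascade run
-- (objective: faster; note A sorts and empties its argument in place — B does not mutate it; the
-- equivalence proved here is about the return value).


-- ===== PORT A =====
-- inner loop: 'for j in range(len(A)-1, -1, -1): if A[j] == i: A[j] -= 1; cnt += 1 else: break'
def solutionInner (i : Int) : List Int → List Int × Int → List Int × Int
  | [], st => st
  | j :: js, (arr, cnt) =>
      match PySem.List.pyGet? arr j with
      | some v =>
          if v = i then solutionInner i js (PySem.List.pySetD arr j (v - 1), cnt + 1)
          else (arr, cnt)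
      | none => (arr, cnt)   -- unreachable: j ranges over valid indices of arr

-- outer loop 'for i in range(n, 0, -1)'; state = (the mutated list A, cnt)
def solutionOuter : List Int → List Int × Int → List Int × Int
  | [], st => st
  | i :: is, (arr, cnt) =>
      let cnt1 := match PySem.List.pyGet? arr (-1) with   -- 'if A[-1] != i: cnt += (i - A[-1])'
        | some v => if v ≠ i then cnt + (i - v) else cnt
        | none => cnt        -- unreachable: arr has i ≥ 1 elements at step i
      let arr1 := match PySem.List.pop? arr with          -- 'A.pop()'
        | some r => r.2
        | none => arr        -- unreachable
      solutionOuter is (solutionInner i (PySem.List.pyRange ((arr1.length : Int) - 1) (-1) (-1)) (arr1, cnt1))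

def solution (A : List Int) : Int :=
  let n : Int := A.length
  let s := PySem.List.sorted A (fun x => x) false        -- 'A.sort()'
  (solutionOuter (PySem.List.pyRange n 0 (-1)) (s, 0)).2

-- ===== PORT B =====
-- 'while u > 0 and b[u-1] == i: u -= 1'
def solutionAltExtend (b : List Int) (i : Int) (u : Int) : Int :=
  if h : 0 < u ∧ PySem.List.pyGet? b (u - 1) = some i then solutionAltExtend b i (u - 1) else u
termination_by u.toNat
decreasing_by omega

-- loop 'for i in range(n, 0, -1)'; state = (cnt, t)
def solutionAltOuter (b : List Int) : List Int → Int × Int → Int × Int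
  | [], st => st
  | i :: is, (cnt, t) =>
      let p := if t = i then
          (cnt + (i - ((PySem.List.pyGet? b (i - 1)).getD 0)), i - 1)  -- b[i-1]; always in range: 1 ≤ i ≤ len b
        else (cnt, t)
      let u := solutionAltExtend b i p.2
      solutionAltOuter b is (p.1 + ((i - 1) - u), u)

def solution_alt (A : List Int) : Int :=
  let b := PySem.List.sorted A (fun x => x) false
  let n : Int := b.length
  (solutionAltOuter b (PySem.List.pyRange n 0 (-1)) (0, n)).1

-- ===== PRECONDITION & SPEC =====
def Spec_solution (A : List Int) (out : Int) : Prop := out = solution_alt A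
instance (A : List Int) (out : Int) : Decidable (Spec_solution A out) := by unfold Spec_solution; infer_instance

-- ===== CLAIM (what is proved, stated in full; the proofs are below) =====
def Claim_equal_solution : Prop := ∀ (A : List Int), Dom_solution A → Spec_solution A (solution A)

-- ===== LEMMAS AND PROOFS =====

-- setting the element just past a prefix
theorem pvSet_append_len (xs ys : List Int) (y z : Int) :
    (xs ++ y :: ys).set xs.length z = xs ++ z :: ys := by
  induction xs with
  | nil => simp
  | cons x xs ih => simp [ih]

-- bounds for the while loop of B
theorem pvExtend_bounds (b : List Int) (v : Int) (n : Nat) :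
    0 ≤ solutionAltExtend b v (n : Int) ∧ solutionAltExtend b v (n : Int) ≤ (n : Int) := by
  induction n using Nat.strong_induction_on with
  | _ n ih =>
    rw [solutionAltExtend]
    split
    · next h =>
      have hn : 0 < n := by exact_mod_cast h.1
      have h1 : (n : Int) - 1 = ((n - 1 : Nat) : Int) := by omega
      rw [h1]
      have := ih (n - 1) (by omega)
      omega
    · omega

-- phase 2 of the inner scan: the run has been decremented, the scan walks into the untouched
-- prefix b.take u exactly as B's while loop does
theorem pvInnerPre (b : List Int) (v : Int) :
    ∀ (u : Nat), u ≤ b.length → ∀ (k : Nat) (cnt : Int),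
    solutionInner v (PySem.List.pyRange ((u : Int) - 1) (-1) (-1))
        (b.take u ++ List.replicate k (v - 1), cnt)
      = (b.take (solutionAltExtend b v u).toNat
            ++ List.replicate (k + (u - (solutionAltExtend b v u).toNat)) (v - 1),
         cnt + ((u : Int) - solutionAltExtend b v u)) := by
  intro u
  induction u using Nat.strong_induction_on with
  | _ u ih =>
    intro hu k cnt
    cases u with
    | zero =>
        rw [solutionAltExtend]
        simp [solutionInner]
    | succ u' =>
        have hu' : u' < b.length := by omega
        have hc1 : ((u' + 1 : Nat) : Int) - 1 = (u' : Int) := by push_cast; ring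
        have hcons : PySem.List.pyRange (((u' + 1 : Nat) : Int) - 1) (-1) (-1)
            = (u' : Int) :: PySem.List.pyRange ((u' : Int) - 1) (-1) (-1) := by
          rw [hc1, PySem.List.pyRange_neg_one_cons (by omega)]
        have htake : b.take (u' + 1) = b.take u' ++ [b[u']] := by
          rw [List.take_add_one, List.getElem?_eq_getElem hu']; rfl
        have hlt : (b.take u').length = u' := List.length_take_of_le (by omega)
        have harr : b.take (u' + 1) ++ List.replicate k (v - 1)
            = b.take u' ++ b[u'] :: List.replicate k (v - 1) := by
          rw [htake, List.append_assoc]; rfl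
        have hget : PySem.List.pyGet? (b.take u' ++ b[u'] :: List.replicate k (v - 1)) (u' : Int)
            = some b[u'] := by
          have := PySem.List.pyGet?_append_length (b.take u') (List.replicate k (v - 1)) b[u']
          rwa [hlt] at this
        have hgetb : PySem.List.pyGet? b (((u' + 1 : Nat) : Int) - 1) = some b[u'] := by
          rw [hc1, PySem.List.pyGet?_natCast, List.getElem?_eq_getElem hu']
        rw [hcons, harr]
        by_cases hb : b[u'] = v
        · -- the scan continues: decrement position u' and recurse
          rw [hb] at hget hgetb ⊢
          have hset : PySem.List.pySetD (b.take u' ++ v :: List.replicate k (v - 1)) (u' : Int) (v - 1)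
              = b.take u' ++ List.replicate (k + 1) (v - 1) := by
            have h2 := pvSet_append_len (b.take u') (List.replicate k (v - 1)) v (v - 1)
            rw [hlt] at h2
            rw [PySem.List.pySetD_of_nonneg _ _ (by omega), Int.toNat_natCast, h2,
              List.replicate_succ]
          have hE : solutionAltExtend b v ((u' + 1 : Nat) : Int) = solutionAltExtend b v (u' : Int) := by
            rw [solutionAltExtend]
            rw [dif_pos ⟨by omega, hgetb⟩, hc1]
          have hbd := pvExtend_bounds b v u'
          simp only [solutionInner, hget]
          rw [if_true, hset, ih u' (by omega) (by omega) (k + 1) (cnt + 1), hE]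
          rw [show (k + 1) + (u' - (solutionAltExtend b v (u' : Int)).toNat)
                = k + (u' + 1 - (solutionAltExtend b v (u' : Int)).toNat) from by omega]
          simp only [Prod.mk.injEq]
          exact ⟨trivial, by push_cast; ring⟩
        · -- the scan breaks here: b[u'] ≠ v
          have hE : solutionAltExtend b v ((u' + 1 : Nat) : Int) = ((u' + 1 : Nat) : Int) := by
            rw [solutionAltExtend, dif_neg]
            intro hcon
            exact hb (Option.some.inj (hgetb.symm.trans hcon.2))
          simp only [solutionInner, hget]
          rw [if_neg hb, hE, ← harr]
          simp

-- phase 1 of the inner scan: the old run (m copies of v) is decremented one by one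
theorem pvInnerRep (b : List Int) (v : Int) :
    ∀ (m : Nat) (u : Nat), u ≤ b.length → ∀ (k : Nat) (cnt : Int),
    solutionInner v (PySem.List.pyRange ((u : Int) + m - 1) (-1) (-1))
        (b.take u ++ List.replicate m v ++ List.replicate k (v - 1), cnt)
      = (b.take (solutionAltExtend b v u).toNat
            ++ List.replicate ((k + m) + (u - (solutionAltExtend b v u).toNat)) (v - 1),
         cnt + (m : Int) + ((u : Int) - solutionAltExtend b v u)) := by
  intro m
  induction m with
  | zero =>
      intro u hu k cnt
      have h0 : (u : Int) + ((0 : Nat) : Int) - 1 = (u : Int) - 1 := by push_cast; ring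
      rw [h0]
      simpa using pvInnerPre b v u hu k cnt
  | succ m ihm =>
      intro u hu k cnt
      have hlt : (b.take u).length = u := List.length_take_of_le hu
      have hplen : (b.take u ++ List.replicate m v).length = u + m := by simp [hlt]
      have hcons : PySem.List.pyRange ((u : Int) + ((m + 1 : Nat) : Int) - 1) (-1) (-1)
          = ((u + m : Nat) : Int) :: PySem.List.pyRange ((u : Int) + ((m : Nat) : Int) - 1) (-1) (-1) := by
        have h1 : (u : Int) + ((m + 1 : Nat) : Int) - 1 = ((u + m : Nat) : Int) := by push_cast; ring
        have h2 : ((u + m : Nat) : Int) - 1 = (u : Int) + ((m : Nat) : Int) - 1 := by push_cast; ring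
        rw [h1, PySem.List.pyRange_neg_one_cons (by omega), h2]
      have harr : b.take u ++ List.replicate (m + 1) v ++ List.replicate k (v - 1)
          = (b.take u ++ List.replicate m v) ++ v :: List.replicate k (v - 1) := by
        rw [List.replicate_succ']
        simp
      have hget : PySem.List.pyGet? ((b.take u ++ List.replicate m v) ++ v :: List.replicate k (v - 1))
          ((u + m : Nat) : Int) = some v := by
        have := PySem.List.pyGet?_append_length (b.take u ++ List.replicate m v)
          (List.replicate k (v - 1)) v
        rwa [hplen] at this
      have hset : PySem.List.pySetD ((b.take u ++ List.replicate m v) ++ v :: List.replicate k (v - 1))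
          ((u + m : Nat) : Int) (v - 1)
          = b.take u ++ List.replicate m v ++ List.replicate (k + 1) (v - 1) := by
        have h2 := pvSet_append_len (b.take u ++ List.replicate m v) (List.replicate k (v - 1)) v (v - 1)
        rw [hplen] at h2
        rw [PySem.List.pySetD_of_nonneg _ _ (by omega), Int.toNat_natCast, h2,
          List.replicate_succ, List.append_assoc]
      rw [hcons, harr]
      simp only [solutionInner, hget]
      rw [if_true, hset, ihm u hu (k + 1) (cnt + 1)]
      rw [show (k + 1) + m = k + (m + 1) from by omega]
      simp only [Prod.mk.injEq]
      refine ⟨trivial, by push_cast; ring⟩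

-- the coupled loop invariant: A's list is always  b.take t ++ replicate (i - t) i
theorem pvMain (b : List Int) :
    ∀ (i t : Nat), t ≤ i → i ≤ b.length → ∀ cnt : Int,
    (solutionOuter (PySem.List.pyRange (i : Int) 0 (-1))
        (b.take t ++ List.replicate (i - t) (i : Int), cnt)).2
      = (solutionAltOuter b (PySem.List.pyRange (i : Int) 0 (-1)) (cnt, (t : Int))).1 := by
  intro i
  induction i with
  | zero =>
      intro t ht hi cnt
      have ht0 : t = 0 := by omega
      subst ht0
      rw [PySem.List.pyRange_neg_one_eq_nil (by omega)]
      simp [solutionOuter, solutionAltOuter]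
  | succ i ih =>
      intro t ht hlen cnt
      have hblen : i < b.length := by omega
      have hcons : PySem.List.pyRange ((i + 1 : Nat) : Int) 0 (-1)
          = ((i + 1 : Nat) : Int) :: PySem.List.pyRange ((i : Nat) : Int) 0 (-1) := by
        have h2 : ((i + 1 : Nat) : Int) - 1 = ((i : Nat) : Int) := by push_cast; ring
        rw [PySem.List.pyRange_neg_one_cons (by omega), h2]
      have hti : (b.take i).length = i := List.length_take_of_le (by omega)
      rw [hcons]
      by_cases ht1 : t = i + 1
      · -- run empty: the popped element is the untouched b[i]
        subst ht1
        have htake : b.take (i + 1) ++ List.replicate (i + 1 - (i + 1)) ((i + 1 : Nat) : Int)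
            = b.take i ++ [b[i]] := by
          rw [Nat.sub_self, List.replicate_zero, List.append_nil, List.take_add_one,
            List.getElem?_eq_getElem hblen]
          rfl
        have hgetb : PySem.List.pyGet? b (((i + 1 : Nat) : Int) - 1) = some b[i] := by
          have h2 : ((i + 1 : Nat) : Int) - 1 = ((i : Nat) : Int) := by push_cast; ring
          rw [h2, PySem.List.pyGet?_natCast, List.getElem?_eq_getElem hblen]
        rw [htake]
        simp only [solutionOuter, solutionAltOuter,
          PySem.List.pyGet?_neg_one_append_singleton, PySem.List.pop?_last, hgetb,
          Option.getD_some]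
        have hcnt : (if b[i] ≠ ((i + 1 : Nat) : Int) then cnt + (((i + 1 : Nat) : Int) - b[i]) else cnt)
            = cnt + (((i + 1 : Nat) : Int) - b[i]) := by
          split_ifs with h
          · rfl
          · rw [not_not.mp h]; ring
        rw [hcnt, hti]
        have hpre := pvInnerPre b ((i + 1 : Nat) : Int) i (by omega) 0 (cnt + (((i + 1 : Nat) : Int) - b[i]))
        simp only [List.replicate_zero, List.append_nil] at hpre
        have h2 : ((i : Nat) : Int) - 1 = ((i : Nat) : Int) - 1 := rfl
        rw [hpre]
        have hbd := pvExtend_bounds b ((i + 1 : Nat) : Int) i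
        have hufc : (((solutionAltExtend b ((i + 1 : Nat) : Int) (i : Int)).toNat : Nat) : Int)
            = solutionAltExtend b ((i + 1 : Nat) : Int) (i : Int) := by omega
        have hih := ih (solutionAltExtend b ((i + 1 : Nat) : Int) (i : Int)).toNat (by omega) (by omega)
            (cnt + (((i + 1 : Nat) : Int) - b[i]) + (((i : Nat) : Int) - solutionAltExtend b ((i + 1 : Nat) : Int) (i : Int)))
        rw [hufc] at hih
        have hval : ((i + 1 : Nat) : Int) - 1 = ((i : Nat) : Int) := by push_cast; ring
        rw [show (0 : Nat) + (i - (solutionAltExtend b ((i + 1 : Nat) : Int) (i : Int)).toNat)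
              = i - (solutionAltExtend b ((i + 1 : Nat) : Int) (i : Int)).toNat from by omega,
          hval, hih]
        congr 1
      · -- run nonempty: the popped element is a run member, worth i+1
        have htlei : t ≤ i := by omega
        have hrep : List.replicate (i + 1 - t) ((i + 1 : Nat) : Int)
            = List.replicate (i - t) ((i + 1 : Nat) : Int) ++ [((i + 1 : Nat) : Int)] := by
          rw [show i + 1 - t = (i - t) + 1 from by omega, List.replicate_succ']
        have harr : b.take t ++ List.replicate (i + 1 - t) ((i + 1 : Nat) : Int)
            = (b.take t ++ List.replicate (i - t) ((i + 1 : Nat) : Int)) ++ [((i + 1 : Nat) : Int)] := by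
          rw [hrep, List.append_assoc]
        have hplen : (b.take t ++ List.replicate (i - t) ((i + 1 : Nat) : Int)).length = i := by
          simp [List.length_take_of_le (show t ≤ b.length by omega)]
          omega
        have hne : ((t : Nat) : Int) = ((i + 1 : Nat) : Int) → False := by
          intro h; exact ht1 (by exact_mod_cast h)
        rw [harr]
        simp only [solutionOuter, solutionAltOuter,
          PySem.List.pyGet?_neg_one_append_singleton, PySem.List.pop?_last,
          if_neg hne]
        have hcnt : (if ((i + 1 : Nat) : Int) ≠ ((i + 1 : Nat) : Int) then
              cnt + (((i + 1 : Nat) : Int) - ((i + 1 : Nat) : Int)) else cnt) = cnt := by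
          simp
        rw [hcnt, hplen]
        have hpre := pvInnerRep b ((i + 1 : Nat) : Int) (i - t) t (by omega) 0 cnt
        simp only [List.replicate_zero, List.append_nil] at hpre
        have hidx : ((i : Nat) : Int) - 1 = ((t : Nat) : Int) + (((i - t : Nat)) : Int) - 1 := by
          push_cast [Nat.cast_sub htlei]; ring
        rw [hidx, hpre]
        have hbd := pvExtend_bounds b ((i + 1 : Nat) : Int) t
        have hufc : (((solutionAltExtend b ((i + 1 : Nat) : Int) (t : Int)).toNat : Nat) : Int)
            = solutionAltExtend b ((i + 1 : Nat) : Int) (t : Int) := by omega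
        have hih := ih (solutionAltExtend b ((i + 1 : Nat) : Int) (t : Int)).toNat (by omega) (by omega)
            (cnt + ((i - t : Nat) : Int) + (((t : Nat) : Int) - solutionAltExtend b ((i + 1 : Nat) : Int) (t : Int)))
        rw [hufc] at hih
        have hval : ((i + 1 : Nat) : Int) - 1 = ((i : Nat) : Int) := by push_cast; ring
        rw [show (0 : Nat) + (i - t) + (t - (solutionAltExtend b ((i + 1 : Nat) : Int) (t : Int)).toNat)
              = i - (solutionAltExtend b ((i + 1 : Nat) : Int) (t : Int)).toNat from by omega,
          hval, hih]
        congr 2 <;> push_cast [Nat.cast_sub htlei] <;> ring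

-- ===== VERDICT (by name: the statement is the Claim_ definition above) =====
theorem solution_spec : Claim_equal_solution := by
  intro A _
  unfold Spec_solution solution solution_alt
  have hlen : (PySem.List.sorted A (fun x => x) false).length = A.length :=
    PySem.List.length_sorted A _ false
  have h := pvMain (PySem.List.sorted A (fun x => x) false)
      (PySem.List.sorted A (fun x => x) false).length
      (PySem.List.sorted A (fun x => x) false).length le_rfl le_rfl 0
  simp only [List.take_length, Nat.sub_self, List.replicate_zero, List.append_nil] at h
  simpa [hlen] using h
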